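-- pv_equiv track=rewrite | github.com/RISHABH12005/Py | LAB7-Q23.py | leap_years
-- ===== SOURCE A (Python) =====
-- def leap_years(start):
--     leap_years = []
--     year = start
--     while len(leap_years) < 15:
--         if (year % 4 == 0 and year % 100 != 0) or (year % 400 == 0):
--             leap_years.append(year)
--         year += 1
--     return leap_years
-- ===== SOURCE B (Python) =====
-- def leap_years(start):
--     # seed: first leap year at or after start
--     y = start
--     while not ((y % 4 == 0 and y % 100 != 0) or (y % 400 == 0)):
--         y += 1
--     res = [y]
--     # jump from leap year to leap year: +4, skipping non-400 centuries (+8)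
--     for _ in range(14):
--         y += 4
--         if y % 100 == 0 and y % 400 != 0:
--             y += 4
--         res.append(y)
--     return res
-- ===== Notes on version B (the rewrite author's own statement) =====
-- stated objective: alternative
-- what changed: B finds the first leap year at or after start, then jumps from leap year to leap year (+4, or +8 across a non-400 century) instead of scanning every calendar year and testing each.
import Mathlib
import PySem

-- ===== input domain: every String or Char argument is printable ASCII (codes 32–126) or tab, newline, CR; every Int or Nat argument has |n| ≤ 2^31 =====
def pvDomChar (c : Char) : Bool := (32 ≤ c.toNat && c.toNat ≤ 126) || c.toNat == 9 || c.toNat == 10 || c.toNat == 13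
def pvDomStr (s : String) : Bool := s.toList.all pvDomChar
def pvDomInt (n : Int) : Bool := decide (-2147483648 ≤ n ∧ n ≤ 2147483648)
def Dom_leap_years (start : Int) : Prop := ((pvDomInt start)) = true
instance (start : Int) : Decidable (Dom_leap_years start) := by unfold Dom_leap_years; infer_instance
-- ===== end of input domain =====

-- B replaces A's scan of every calendar year with a direct traversal of leap years
-- (seed the first leap year, then jump +4, +8 across non-400 centuries): objective 'faster' only if measured; stated as alternative/idiomatic.


-- ===== PORT A =====
-- Python's leap test, shared by both ports (same expression in both sources).
def pvIsLeap (y : Int) : Bool :=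
  (PySem.Int.mod y 4 == 0 && !(PySem.Int.mod y 100 == 0)) || PySem.Int.mod y 400 == 0

-- A's while loop; the list is accumulated reversed (Python appends) and reversed at exit.
-- Fuel 128 only makes the loop total: the 15th leap year lies within 120 years of start
-- (first leap within 7 years, then 14 gaps of at most 8), so the fuel is never exhausted.
def pvLoopA : Nat → Int → List Int → List Int
  | 0, _, acc => acc.reverse
  | f + 1, y, acc =>
    if acc.length < 15 then
      pvLoopA f (y + 1) (if pvIsLeap y then y :: acc else acc)
    else acc.reverse

def leap_years (start : Int) : List Int := pvLoopA 128 start []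

-- ===== PORT B =====
-- B's seed loop: increment until the leap rule holds (fuel 8 for totality; the gap
-- between consecutive leap years is at most 8, so a leap year is found within 7 steps).
def pvSeek : Nat → Int → Int
  | 0, y => y
  | f + 1, y => if pvIsLeap y then y else pvSeek f (y + 1)

-- B's jump: next leap year after leap year y.
def pvStep (y : Int) : Int :=
  let y4 := y + 4
  if PySem.Int.mod y4 100 == 0 && !(PySem.Int.mod y4 400 == 0) then y4 + 4 else y4

-- B's for-loop over range(14), appending each jumped year.
def pvCollect : Nat → Int → List Int
  | 0, _ => []
  | n + 1, y => let y' := pvStep y; y' :: pvCollect n y'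

def leap_years_alt (start : Int) : List Int :=
  let y := pvSeek 8 start
  y :: pvCollect 14 y

-- ===== PRECONDITION & SPEC =====
def Spec_leap_years (start : Int) (out : List Int) : Prop := out = leap_years_alt start
instance (start : Int) (out : List Int) : Decidable (Spec_leap_years start out) := by unfold Spec_leap_years; infer_instance

-- ===== CLAIM (what is proved, stated in full; the proofs are below) =====
def Claim_equal_leap_years : Prop := ∀ (start : Int), Dom_leap_years start → Spec_leap_years start (leap_years start)

-- ===== LEMMAS AND PROOFS =====

-- The leap test is periodic with period 400.
-- Python '%' by a positive divisor of 400 is invariant under a 400-year shift.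
theorem pvMod_shift (y k d : Int) (hd : 0 < d) (hdvd : d ∣ 400) :
    PySem.Int.mod (y + 400 * k) d = PySem.Int.mod y d := by
  rw [PySem.Int.mod_eq_emod_of_pos hd, PySem.Int.mod_eq_emod_of_pos hd]
  obtain ⟨c, hc⟩ := hdvd
  rw [hc, show y + d * c * k = y + d * (c * k) by ring, Int.add_mul_emod_self_left]

theorem pvIsLeap_shift (y k : Int) : pvIsLeap (y + 400 * k) = pvIsLeap y := by
  simp only [pvIsLeap, pvMod_shift y k 4 (by norm_num) ⟨100, by norm_num⟩,
    pvMod_shift y k 100 (by norm_num) ⟨4, by norm_num⟩,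
    pvMod_shift y k 400 (by norm_num) ⟨1, by norm_num⟩]

theorem pvLoopA_shift (f : Nat) (y k : Int) (acc : List Int) :
    pvLoopA f (y + 400 * k) (acc.map (· + 400 * k)) = (pvLoopA f y acc).map (· + 400 * k) := by
  induction f generalizing y acc with
  | zero => simp [pvLoopA]
  | succ f ih =>
    simp only [pvLoopA, List.length_map, pvIsLeap_shift]
    by_cases h : acc.length < 15
    · simp only [h, if_true]
      by_cases hl : pvIsLeap y
      · rw [hl]; simp only [if_true]
        have hm : (y + 400 * k) :: acc.map (· + 400 * k) = ((y :: acc).map (· + 400 * k)) := by simp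
        have e : y + 400 * k + 1 = (y + 1) + 400 * k := by ring
        rw [hm, e]; exact ih (y + 1) (y :: acc)
      · rw [Bool.of_not_eq_true hl]; simp only [if_false, Bool.false_eq_true]
        have e : y + 400 * k + 1 = (y + 1) + 400 * k := by ring
        rw [e]; exact ih (y + 1) acc
    · simp [h]

theorem pvSeek_shift (f : Nat) (y k : Int) :
    pvSeek f (y + 400 * k) = pvSeek f y + 400 * k := by
  induction f generalizing y with
  | zero => simp [pvSeek]
  | succ f ih =>
    simp only [pvSeek, pvIsLeap_shift]
    by_cases hl : pvIsLeap y
    · simp [hl]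
    · rw [Bool.of_not_eq_true hl]
      simp only [if_false, Bool.false_eq_true]
      have : y + 400 * k + 1 = (y + 1) + 400 * k := by ring
      rw [this, ih]

theorem pvStep_shift (y k : Int) : pvStep (y + 400 * k) = pvStep y + 400 * k := by
  simp only [pvStep]
  have e : y + 400 * k + 4 = y + 4 + 400 * k := by ring
  rw [e, pvMod_shift (y + 4) k 100 (by norm_num) ⟨4, by norm_num⟩,
    pvMod_shift (y + 4) k 400 (by norm_num) ⟨1, by norm_num⟩]
  split_ifs <;> ring

theorem pvCollect_shift (n : Nat) (y k : Int) :
    pvCollect n (y + 400 * k) = (pvCollect n y).map (· + 400 * k) := by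
  induction n generalizing y with
  | zero => simp [pvCollect]
  | succ n ih => simp only [pvCollect, pvStep_shift, ih, List.map_cons]

theorem leap_years_shift (r k : Int) :
    leap_years (r + 400 * k) = (leap_years r).map (· + 400 * k) := by
  have := pvLoopA_shift 128 r k []
  simpa [leap_years] using this

theorem leap_years_alt_shift (r k : Int) :
    leap_years_alt (r + 400 * k) = (leap_years_alt r).map (· + 400 * k) := by
  simp only [leap_years_alt, pvSeek_shift, pvCollect_shift, List.map_cons]

-- Equality on one full period, checked by computation.
set_option maxRecDepth 100000 in
set_option maxHeartbeats 4000000 in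
theorem leap_years_base : ∀ n : Nat, n < 400 → leap_years (n : Int) = leap_years_alt (n : Int) := by decide

theorem leap_years_eq (start : Int) : leap_years start = leap_years_alt start := by
  have hmod : start % 400 + 400 * (start / 400) = start := Int.emod_add_mul_ediv start 400
  have hr0 : 0 ≤ start % 400 := Int.emod_nonneg start (by norm_num)
  have hr1 : start % 400 < 400 := Int.emod_lt_of_pos start (by norm_num)
  set r := start % 400 with hrdef
  set k := start / 400 with hkdef
  have hbase : leap_years r = leap_years_alt r := by
    have hn : r = ((r.toNat : Nat) : Int) := by omega
    have hlt : r.toNat < 400 := by omega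
    rw [hn]; exact leap_years_base r.toNat hlt
  calc leap_years start = leap_years (r + 400 * k) := by rw [hmod]
    _ = (leap_years r).map (· + 400 * k) := leap_years_shift r k
    _ = (leap_years_alt r).map (· + 400 * k) := by rw [hbase]
    _ = leap_years_alt (r + 400 * k) := (leap_years_alt_shift r k).symm
    _ = leap_years_alt start := by rw [hmod]

-- ===== VERDICT (by name: the statement is the Claim_ definition above) =====
theorem leap_years_spec : Claim_equal_leap_years := by
  intro start _
  unfold Spec_leap_years
  exact leap_years_eq start
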